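-- pv_equiv track=rewrite | github.com/pypi-data/pypi-mirror-399 | packages/trace-mind/trace_mind-2.0.1.tar.gz/trace_mind-2.0.1/tm/pipeline/selectors.py | parse
-- ===== SOURCE A (Python) =====
-- from typing import Any, List, Tuple
--
-- def parse(expr: str) -> List[str]:
--     toks: List[str] = []
--     buf = ""
--     i = 0
--     while i < len(expr):
--         ch = expr[i]
--         if ch == ".":
--             if buf:
--                 toks.append(buf)
--                 buf = ""
--             i += 1
--         elif ch == "[":
--             if buf:
--                 toks.append(buf)
--                 buf = ""
--             j = expr.find("]", i)
--             if j < 0: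
--                 raise ValueError(f"Unclosed '[' in selector: {expr}")
--             toks.append(expr[i : j + 1])
--             i = j + 1
--         else:
--             buf += ch
--             i += 1
--     if buf:
--         toks.append(buf)
--     return toks
-- ===== SOURCE B (Python) =====
-- def parse(expr: str):
--     toks = []
--     i = 0
--     while True:
--         j = expr.find("[", i)
--         if j < 0:
--             toks.extend(t for t in expr[i:].split(".") if t)
--             return toks
--         toks.extend(t for t in expr[i:j].split(".") if t)
--         k = expr.find("]", j)
--         if k < 0:
--             raise ValueError(f"Unclosed '[' in selector: {expr}")
--         toks.append(expr[j:k + 1])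
--         i = k + 1
-- ===== Notes on version B (the rewrite author's own statement) =====
-- stated objective: faster
-- what changed: B replaces A's char-by-char state machine with an accumulating buffer by an outer loop that jumps between bracket groups with str.find and tokenizes the plain stretch before each with split('.') plus a truthiness filter, moving all scanning into C-level string primitives.
import Mathlib
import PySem

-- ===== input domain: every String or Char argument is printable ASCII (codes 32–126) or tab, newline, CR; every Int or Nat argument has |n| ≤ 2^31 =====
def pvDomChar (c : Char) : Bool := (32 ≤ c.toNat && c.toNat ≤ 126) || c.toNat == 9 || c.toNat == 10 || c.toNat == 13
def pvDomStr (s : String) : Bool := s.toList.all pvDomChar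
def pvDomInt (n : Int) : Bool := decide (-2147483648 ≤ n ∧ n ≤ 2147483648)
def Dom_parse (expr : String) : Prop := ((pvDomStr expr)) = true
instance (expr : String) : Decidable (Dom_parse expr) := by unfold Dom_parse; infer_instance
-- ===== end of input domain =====

-- B replaces A's char-by-char buffer state machine by find-driven jumps between
-- bracket groups with split('.') tokenization of the plain stretches (objective:
-- faster, measured; equal return value on all non-raising inputs).

-- ===== PORT A =====
-- A's while-loop over the index i, carried as structural recursion over the
-- remaining suffix cs = expr[i:]; `none` = the ValueError on an unclosed '['.
def parseAAux (toks : List String) (buf : List Char) (cs : List Char) : Option (List String) :=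
  match cs with
  | [] => some (if buf = [] then toks else toks ++ [String.mk buf])
  | ch :: rest =>
    if ch = '.' then
      parseAAux (if buf = [] then toks else toks ++ [String.mk buf]) [] rest
    else if ch = '[' then
      -- expr.find("]", i) searches from i inclusive = findIdx? over the suffix
      match (ch :: rest).findIdx? (fun c => c = ']') with
      | none => none
      | some j =>
        parseAAux ((if buf = [] then toks else toks ++ [String.mk buf]) ++
            [String.mk ((ch :: rest).take (j + 1))]) [] ((ch :: rest).drop (j + 1))
    else
      parseAAux toks (buf ++ [ch]) rest
termination_by cs.length
decreasing_by
  · simp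
  · simp only [List.length_drop, List.length_cons]; omega
  · simp

def parse (expr : String) : List String := (parseAAux [] [] expr.toList).getD []

-- ===== PORT B =====
-- transliteration of s.split(".") from Source B
def splitDot (cs : List Char) : List (List Char) :=
  match cs with
  | [] => [[]]
  | c :: r =>
    if c = '.' then [] :: splitDot r
    else
      match splitDot r with
      | [] => [[c]]   -- unreachable: splitDot never returns []
      | t :: ts => (c :: t) :: ts

-- `[t for t in s.split(".") if t]`
def segs (cs : List Char) : List String :=
  ((splitDot cs).filter (fun t => !t.isEmpty)).map String.mk

-- Source B's outer while-loop: jump to the next '[', tokenize the plain stretch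
-- before it, then consume one bracket group; `none` = the ValueError.
def parseBAux (toks : List String) (cs : List Char) : Option (List String) :=
  match hj : cs.findIdx? (fun c => c = '[') with
  | none => some (toks ++ segs cs)
  | some j =>
    match (cs.drop j).findIdx? (fun c => c = ']') with
    | none => none
    | some k =>
      parseBAux ((toks ++ segs (cs.take j)) ++ [String.mk ((cs.drop j).take (k + 1))])
        ((cs.drop j).drop (k + 1))
termination_by cs.length
decreasing_by
  have hlt := List.findIdx?_eq_some_iff_findIdx_eq.mp hj
  simp only [List.length_drop]
  omega

def parse_alt (expr : String) : List String := (parseBAux [] expr.toList).getD []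

-- ===== PRECONDITION & SPEC =====
-- Pre_ excludes exactly the inputs on which A raises ValueError: those with a
-- '[' after the last ']' (i.e. a '[' that is never closed).
def Pre_parse (expr : String) : Prop :=
  ¬ ('[' ∈ expr.toList.reverse.takeWhile (fun c => c ≠ ']'))
instance (expr : String) : Decidable (Pre_parse expr) := by unfold Pre_parse; infer_instance

def pvWitness_parse : String := "a.b[0].c"

def Spec_parse (expr : String) (out : List String) : Prop := out = parse_alt expr
instance (expr : String) (out : List String) : Decidable (Spec_parse expr out) := by
  unfold Spec_parse; infer_instance

-- ===== CLAIM (what is proved, stated in full; the proofs are below) =====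
def Claim_equal_parse : Prop :=
  ∀ (expr : String), Dom_parse expr → Pre_parse expr → Spec_parse expr (parse expr)

-- ===== LEMMAS AND PROOFS =====

theorem segs_nil : segs [] = [] := by
  simp [segs, splitDot, List.filter]

theorem splitDot_no_dot (l : List Char) (h : '.' ∉ l) : splitDot l = [l] := by
  induction l with
  | nil => rfl
  | cons c r ih =>
    simp only [List.mem_cons, not_or] at h
    rw [splitDot, if_neg (fun e => h.1 e.symm), ih h.2]

theorem segs_no_dot (l : List Char) (h : '.' ∉ l) :
    segs l = if l = [] then [] else [String.mk l] := by
  simp only [segs, splitDot_no_dot l h]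
  cases l <;> simp [List.filter, List.isEmpty]

theorem splitDot_append_dot (l r : List Char) (h : '.' ∉ l) :
    splitDot (l ++ '.' :: r) = l :: splitDot r := by
  induction l with
  | nil => simp [splitDot]
  | cons c l' ih =>
    simp only [List.mem_cons, not_or] at h
    rw [List.cons_append, splitDot, if_neg (fun e => h.1 e.symm), ih h.2]

theorem segs_append_dot (l r : List Char) (h : '.' ∉ l) :
    segs (l ++ '.' :: r) = (if l = [] then [] else [String.mk l]) ++ segs r := by
  simp only [segs, splitDot_append_dot l r h]
  cases l <;> simp [List.filter, List.isEmpty]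

-- A's processing of a bracket-free stretch `pre` with pending buffer `buf`
-- flushes exactly the '.'-separated nonempty segments of buf ++ pre.
theorem parseA_plain (tail : List Char) (ht : tail = [] ∨ ∃ r, tail = '[' :: r)
    (pre : List Char) : ∀ (buf : List Char) (toks : List String),
    '[' ∉ pre → '.' ∉ buf → '[' ∉ buf →
    parseAAux toks buf (pre ++ tail) = parseAAux (toks ++ segs (buf ++ pre)) [] tail := by
  induction pre with
  | nil =>
    intro buf toks _ hbd _
    rcases ht with rfl | ⟨r, rfl⟩
    · rw [List.append_nil, List.append_nil]
      by_cases hb : buf = [] <;>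
        simp [parseAAux, segs_no_dot buf hbd, hb, segs_nil]
    · rw [List.append_nil, List.nil_append]
      by_cases hb : buf = [] <;>
        simp [parseAAux, segs_no_dot buf hbd, hb, segs_nil]
  | cons c pre' ih =>
    intro buf toks hpre hbd hbb
    simp only [List.mem_cons, not_or] at hpre
    have hcb : c ≠ '[' := fun e => hpre.1 e.symm
    by_cases hd : c = '.'
    · subst hd
      rw [List.cons_append, show parseAAux toks buf ('.' :: (pre' ++ tail)) =
          parseAAux (if buf = [] then toks else toks ++ [String.mk buf]) [] (pre' ++ tail)
        from by simp [parseAAux]]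
      rw [ih [] _ hpre.2 (by simp) (by simp), List.nil_append,
        segs_append_dot buf pre' hbd]
      by_cases hb : buf = [] <;> simp [hb]
    · rw [List.cons_append, show parseAAux toks buf (c :: (pre' ++ tail)) =
          parseAAux toks (buf ++ [c]) (pre' ++ tail)
        from by simp [parseAAux, hd, hcb]]
      have hbd' : '.' ∉ buf ++ [c] := by
        simp only [List.mem_append, List.mem_singleton, not_or]
        exact ⟨hbd, fun e => hd e.symm⟩
      have hbb' : '[' ∉ buf ++ [c] := by
        simp only [List.mem_append, List.mem_singleton, not_or]
        exact ⟨hbb, fun e => hcb e.symm⟩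
      rw [ih (buf ++ [c]) toks hpre.2 hbd' hbb']
      simp

theorem parseBAux_nil (toks : List String) : parseBAux toks [] = some toks := by
  simp [parseBAux, segs, splitDot, List.filter]

theorem parse_main_n : ∀ (n : Nat) (cs : List Char), cs.length ≤ n → ∀ (toks : List String),
    parseAAux toks [] cs = parseBAux toks cs := by
  intro n
  induction n with
  | zero =>
    intro cs hlen toks
    rw [List.length_eq_zero_iff.mp (Nat.le_zero.mp hlen)]
    simp [parseAAux, parseBAux_nil]
  | succ n ih =>
    intro cs hlen toks
    rcases h : cs.findIdx? (fun c => c = '[') with _ | j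
    · have hnotin : '[' ∉ cs := by
        intro hm
        have := List.findIdx?_eq_none_iff.mp h '[' hm
        simp at this
      have hplain := parseA_plain [] (Or.inl rfl) cs [] toks hnotin (by simp) (by simp)
      rw [parseBAux, h]
      simpa [parseAAux] using hplain
    · have hj := List.findIdx?_eq_some_iff_getElem.mp h
      obtain ⟨hjlt, hpj, hlt⟩ := hj
      have hcj : cs[j] = '[' := by simpa using hpj
      have hnottake : '[' ∉ cs.take j := by
        intro hm
        obtain ⟨i, hi, hgi⟩ := List.mem_take_iff_getElem.mp hm
        have hij : i < j := lt_of_lt_of_le hi (Nat.min_le_left _ _)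
        exact hlt i hij (by simp [hgi])
      have hdropj : cs.drop j = '[' :: cs.drop (j + 1) := by
        rw [List.drop_eq_getElem_cons hjlt, hcj]
      have hplain := parseA_plain ('[' :: cs.drop (j + 1)) (Or.inr ⟨_, rfl⟩)
        (cs.take j) [] toks hnottake (by simp) (by simp)
      rw [← hdropj, List.take_append_drop, List.nil_append] at hplain
      rw [hplain, parseBAux, h]
      rcases hk : (cs.drop j).findIdx? (fun c => c = ']') with _ | k
      · have hk' : ('[' :: cs.drop (j + 1)).findIdx? (fun c => c = ']') = none := by
          rw [← hdropj]; exact hk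
        simp only [hk]
        rw [hdropj]
        simp [parseAAux, hk']
      · have hk' : ('[' :: cs.drop (j + 1)).findIdx? (fun c => c = ']') = some k := by
          rw [← hdropj]; exact hk
        have hstep : parseAAux (toks ++ segs (cs.take j)) [] (cs.drop j) =
            parseAAux ((toks ++ segs (cs.take j)) ++
              [String.mk ((cs.drop j).take (k + 1))]) [] ((cs.drop j).drop (k + 1)) := by
          rw [hdropj]
          simp [parseAAux, hk']
        simp only [hk]
        rw [hstep, ih _ (by simp only [List.length_drop]; omega)]

theorem parse_main (cs : List Char) (toks : List String) :
    parseAAux toks [] cs = parseBAux toks cs :=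
  parse_main_n cs.length cs (Nat.le_refl _) toks

-- ===== VERDICT (by name: the statement is the Claim_ definition above) =====
theorem parse_spec : Claim_equal_parse := by
  intro expr _ _
  unfold Spec_parse parse parse_alt
  rw [parse_main]
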